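-- pv_equiv track=rewrite | github.com/Deltares/HYDROLIB-core | hydrolib/core/base/parser.py | _read_header_comments
-- ===== SOURCE A (Python) =====
-- from typing import Dict, List, Tuple
--
-- def _read_header_comments(lines: List[str]) -> Tuple[List[str], int]:
--     """Read the header comments of the lines from the file.
--     The comments are only expected at the start of the file.
--     When a non comment line is encountered, all comments from the header will be retuned together with the start index of the data.
--
--     Args:
--         lines (List[str]): Lines from the the file which is read.
--
--     Returns:
--         Tuple of List[str] and int, the List[str] contains the commenst from the header, the int is the start index of the data.
--     """
--     comments: List[str] = []
--     start_timeseries_index = 0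
--     for line_index, line in enumerate(lines):
--
--         line = line.strip()
--
--         if len(line) == 0:
--             comments.append(line)
--             continue
--
--         if line.startswith("#") or line.startswith("*"):
--             comments.append(line[1:])
--             continue
--
--         start_timeseries_index = line_index
--         break
--
--     return comments, start_timeseries_index
-- ===== SOURCE B (Python) =====
-- from typing import Dict, List, Tuple
--
--
-- def _read_header_comments(lines: List[str]) -> Tuple[List[str], int]:
--     stripped = [line.strip() for line in lines]
--     data = next((i for i, s in enumerate(stripped) if s and s[0] not in "#*"), None)
--     comments = [s[1:] if s else s for s in stripped[:data]]
--     return comments, data if data is not None else 0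
-- ===== Notes on version B (the rewrite author's own statement) =====
-- stated objective: alternative
-- what changed: B strips all lines up front, locates the data start as the index of the first non-blank line not opening with '#'/'*' (next over enumerate, None if absent), and derives the comments by slice-and-transform up to that index; A instead interleaves stripping, comment accumulation and the index bookkeeping in one indexed loop with a break.
import Mathlib
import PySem

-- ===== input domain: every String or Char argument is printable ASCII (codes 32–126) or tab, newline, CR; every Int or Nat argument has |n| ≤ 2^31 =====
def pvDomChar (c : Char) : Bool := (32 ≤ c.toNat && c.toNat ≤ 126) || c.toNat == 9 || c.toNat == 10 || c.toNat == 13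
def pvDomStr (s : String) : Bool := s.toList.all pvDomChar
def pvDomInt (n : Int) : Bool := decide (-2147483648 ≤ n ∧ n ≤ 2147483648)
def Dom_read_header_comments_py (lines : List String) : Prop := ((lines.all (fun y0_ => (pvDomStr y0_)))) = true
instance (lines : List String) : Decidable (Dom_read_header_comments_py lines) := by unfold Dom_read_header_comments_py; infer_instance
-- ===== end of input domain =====

-- B strips all lines up front, locates the first data line's index, and slice-transforms the prefix before it,
-- instead of A's single indexed loop with running accumulators and a break (objective: alternative decomposition).

-- ===== PORT A =====
-- the enumerate loop of A: rest of the lines, current index, accumulated comments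
def rhcLoopA (rest : List String) (idx : Nat) (comments : List String) : List String × Int :=
  match rest with
  | [] => (comments, 0)
  | line :: rest' =>
      let s := PySem.Str.strip line
      if PySem.Str.len s == 0 then rhcLoopA rest' (idx + 1) (comments ++ [s])
      else if PySem.Str.startswith s "#" || PySem.Str.startswith s "*" then
        rhcLoopA rest' (idx + 1) (comments ++ [PySem.Str.slice s (some 1) none])
      else (comments, (idx : Int))

def read_header_comments_py (lines : List String) : List String × Int :=
  rhcLoopA lines 0 []

-- ===== PORT B =====
-- `s and s[0] not in "#*"` — the test picking out a data line among the stripped lines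
def rhcIsData (s : String) : Bool :=
  match s.toList with
  | [] => false
  | c :: _ => !(c == '#' || c == '*')

-- `s[1:] if s else s`, applied to an already stripped line
def rhcTransform (s : String) : String :=
  if s == "" then s else PySem.Str.slice s (some 1) none

def read_header_comments_py_alt (lines : List String) : List String × Int :=
  let stripped := lines.map PySem.Str.strip
  let data : Option Nat := stripped.findIdx? rhcIsData
  -- `stripped[:data]`: the whole list when data is None
  let comments := (match data with | some i => stripped.take i | none => stripped).map rhcTransform
  (comments, match data with | some i => (i : Int) | none => 0)

-- ===== PRECONDITION & SPEC =====
def Spec_read_header_comments_py (lines : List String) (out : List String × Int) : Prop := out = read_header_comments_py_alt lines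
instance (lines : List String) (out : List String × Int) : Decidable (Spec_read_header_comments_py lines out) := by unfold Spec_read_header_comments_py; infer_instance

-- ===== CLAIM (what is proved, stated in full; the proofs are below) =====
def Claim_equal_read_header_comments_py : Prop := ∀ (lines : List String), Dom_read_header_comments_py lines → Spec_read_header_comments_py lines (read_header_comments_py lines)

-- ===== LEMMAS AND PROOFS =====
-- proof-side vocabulary: A's header test and per-line comment transform
def rhcIsHeader (line : String) : Bool :=
  let s := PySem.Str.strip line
  PySem.Str.len s == 0 || PySem.Str.startswith s "#" || PySem.Str.startswith s "*"

def rhcComment (line : String) : String :=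
  let s := PySem.Str.strip line
  if PySem.Str.len s != 0 then PySem.Str.slice s (some 1) none else s

lemma str_empty_iff (s : String) : s = "" ↔ s.toList = [] := by
  rw [← String.toList_inj]; simp

lemma charBeqComm (a b : Char) : (a == b) = (b == a) := by
  by_cases hab : a = b
  · simp [hab]
  · simp [hab, Ne.symm hab]

lemma rhcIsData_eq (l : String) : rhcIsData (PySem.Str.strip l) = !rhcIsHeader l := by
  unfold rhcIsData rhcIsHeader
  cases h : (PySem.Str.strip l).toList with
  | nil => simp [PySem.Str.len, h, PySem.Str.startswith, PySem.Chars.startswith]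
  | cons c t =>
      have hne : (((t.length : Int) + 1) == 0) = false := by
        simp; omega
      simp [PySem.Str.len, h, PySem.Str.startswith, PySem.Chars.startswith,
        List.isPrefixOf, hne]
      rw [charBeqComm '#' c, charBeqComm '*' c]

lemma rhcComment_eq (l : String) : rhcComment l = rhcTransform (PySem.Str.strip l) := by
  unfold rhcComment rhcTransform
  by_cases h : PySem.Str.strip l = ""
  · simp [h, PySem.Str.len]
  · have hl : PySem.Chars.strip l.toList ≠ [] := by
      simpa using fun hn => h ((str_empty_iff _).mpr (by simpa using hn))
    simp [h, PySem.Str.len, List.length_eq_zero_iff, hl]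

lemma rhcLoopA_eq (ls : List String) : ∀ (i : Nat) (cs : List String),
    rhcLoopA ls i cs =
      (cs ++ (ls.takeWhile rhcIsHeader).map rhcComment,
       if (ls.takeWhile rhcIsHeader).length < ls.length
         then ((i + (ls.takeWhile rhcIsHeader).length : Nat) : Int) else 0) := by
  induction ls with
  | nil => intro i cs; simp [rhcLoopA]
  | cons line rest ih =>
    intro i cs
    by_cases h0 : PySem.Chars.strip line.toList = []
    · simp [rhcLoopA, List.takeWhile, rhcIsHeader, rhcComment, h0, ih]
      split <;> omega
    · have hb : ((((PySem.Chars.strip line.toList).length : Int)) == 0) = false := by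
        simp [List.length_eq_zero_iff, h0]
      by_cases h1 : PySem.Chars.startswith (PySem.Chars.strip line.toList) ['#'] = true
        ∨ PySem.Chars.startswith (PySem.Chars.strip line.toList) ['*'] = true
      · have h1b : (PySem.Chars.startswith (PySem.Chars.strip line.toList) ['#']
            || PySem.Chars.startswith (PySem.Chars.strip line.toList) ['*']) = true := by
          rcases h1 with h | h <;> simp [h]
        simp [rhcLoopA, List.takeWhile, rhcIsHeader, hb, h1b, ih]
        constructor
        · simp [rhcComment, List.length_eq_zero_iff, h0]
        · rcases Nat.lt_or_ge (List.takeWhile rhcIsHeader rest).length rest.length with hlen | hlen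
          · rw [if_pos hlen, if_pos (by omega)]
            ring
          · rw [if_neg (by omega), if_neg (by omega)]
      · rw [not_or] at h1
        simp [rhcLoopA, List.takeWhile, rhcIsHeader, hb, h1.1, h1.2]

-- B's search for the first data line, characterised by A's header prefix
lemma rhcFind_eq (ls : List String) :
    (ls.map PySem.Str.strip).findIdx? rhcIsData =
      (if (ls.takeWhile rhcIsHeader).length < ls.length
        then some (ls.takeWhile rhcIsHeader).length else none) := by
  induction ls with
  | nil => simp
  | cons l rest ih =>
    rw [List.map_cons, List.findIdx?_cons]
    by_cases h : rhcIsData (PySem.Str.strip l) = true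
    · have hh : rhcIsHeader l = false := by have := rhcIsData_eq l; simp_all
      simp [h, hh]
    · have hh : rhcIsHeader l = true := by have := rhcIsData_eq l; simp_all
      rw [if_neg h, ih]
      rw [List.takeWhile_cons, if_pos hh]
      by_cases hlen : (rest.takeWhile rhcIsHeader).length < rest.length
      · rw [if_pos hlen, if_pos (by simp; omega)]
        simp
      · rw [if_neg hlen, if_neg (by simp; omega)]
        simp

lemma rhcAlt_eq (ls : List String) :
    read_header_comments_py_alt ls =
      ((ls.takeWhile rhcIsHeader).map rhcComment,
       if (ls.takeWhile rhcIsHeader).length < ls.length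
         then ((ls.takeWhile rhcIsHeader).length : Int) else 0) := by
  unfold read_header_comments_py_alt
  show ((match (ls.map PySem.Str.strip).findIdx? rhcIsData with
        | some i => (ls.map PySem.Str.strip).take i
        | none => ls.map PySem.Str.strip).map rhcTransform,
       (match (ls.map PySem.Str.strip).findIdx? rhcIsData with
        | some i => ((i : Nat) : Int) | none => 0)) = _
  rw [rhcFind_eq]
  have hmap : ∀ (xs : List String), xs.map rhcComment = (xs.map PySem.Str.strip).map rhcTransform := by
    intro xs
    rw [List.map_map]
    exact (List.map_congr_left fun l _ => rhcComment_eq l)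
  by_cases hlen : (ls.takeWhile rhcIsHeader).length < ls.length
  · rw [if_pos hlen, if_pos hlen]
    show (((ls.map PySem.Str.strip).take (ls.takeWhile rhcIsHeader).length).map rhcTransform,
        (((ls.takeWhile rhcIsHeader).length : Nat) : Int)) = _
    rw [← List.map_take,
      show ls.take (ls.takeWhile rhcIsHeader).length = ls.takeWhile rhcIsHeader from
        (List.prefix_iff_eq_take.mp (List.takeWhile_prefix _)).symm, ← hmap]
  · rw [if_neg hlen, if_neg hlen]
    show ((ls.map PySem.Str.strip).map rhcTransform, (0 : Int)) = _
    rw [← hmap]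
    have htw : ls.takeWhile rhcIsHeader = ls := by
      have hle : (ls.takeWhile rhcIsHeader).length ≤ ls.length := (List.takeWhile_prefix _).length_le
      exact (List.takeWhile_prefix _).eq_of_length (by omega)
    rw [htw]

-- ===== VERDICT (by name: the statement is the Claim_ definition above) =====
theorem read_header_comments_py_spec : Claim_equal_read_header_comments_py := by
  intro lines _
  unfold Spec_read_header_comments_py read_header_comments_py
  rw [rhcLoopA_eq, rhcAlt_eq]
  simp
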